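-- pv_equiv track=rewrite | github.com/nathan-zym268/aoc-2020 | day17.py | conway_cube_part1
-- ===== SOURCE A (Python) =====
-- from collections import Counter
-- from itertools import product
--
-- def conway_cube_part1(input_str):
--     # initial status, z = 0
--     cur_active_cubes = set()
--     lines = [line for line in input_str.split() if line]
--     for x in range(len(lines)):
--         for y in range(len(lines[x])):
--             if lines[x][y] == '#':
--                 cur_active_cubes.add((x, y, 0))
--
--     for i in range(6):
--         new_active_cubes = set()
--         neighbour_cur_inactive = []
--         for cube in cur_active_cubes:
--             x, y, z = cube
--             all_neighbours = list(
--                 product(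
--                     range(x - 1, x + 2), range(y - 1, y + 2),
--                     range(z - 1, z + 2),
--                 ),
--             )
--             neighbour_active = [
--                 item for item in all_neighbours
--                 if item in cur_active_cubes and item != cube
--             ]
--             neighbour_inactive = [
--                 item for item in all_neighbours
--                 if item not in cur_active_cubes and item != cube
--             ]
--             neighbour_cur_inactive += neighbour_inactive
--             if len(neighbour_active) in (2, 3):
--                 new_active_cubes.add(cube)
--         inactive_counter = Counter(neighbour_cur_inactive)
--         new_active_cubes = new_active_cubes.union(
--             {key for key, value in inactive_counter.items() if value == 3},
--         )
--         cur_active_cubes = new_active_cubes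
--
--     return len(cur_active_cubes)
-- ===== SOURCE B (Python) =====
-- from collections import Counter
-- from itertools import product
--
--
-- def conway_cube_part1(input_str):
--     active = set()
--     lines = [line for line in input_str.split() if line]
--     for x, line in enumerate(lines):
--         for y, ch in enumerate(line):
--             if ch == '#':
--                 active.add((x, y, 0))
--
--     for _ in range(6):
--         counts = Counter(
--             nbr
--             for cube in active
--             for nbr in product(
--                 range(cube[0] - 1, cube[0] + 2),
--                 range(cube[1] - 1, cube[1] + 2),
--                 range(cube[2] - 1, cube[2] + 2),
--             )
--             if nbr != cube
--         )
--         active = {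
--             cell for cell, n in counts.items()
--             if n == 3 or (n == 2 and cell in active)
--         }
--
--     return len(active)
-- ===== Notes on version B (the rewrite author's own statement) =====
-- stated objective: simpler
-- what changed: Each generation is computed from a single Counter over the 26-neighbourhoods of all active cubes with one unified birth/survival rule (count==3, or count==2 and already active), instead of A's per-cube scan that classifies neighbours into active/inactive lists, decides survival inside the loop and births from a separate counter of inactive neighbours.
import Mathlib
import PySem

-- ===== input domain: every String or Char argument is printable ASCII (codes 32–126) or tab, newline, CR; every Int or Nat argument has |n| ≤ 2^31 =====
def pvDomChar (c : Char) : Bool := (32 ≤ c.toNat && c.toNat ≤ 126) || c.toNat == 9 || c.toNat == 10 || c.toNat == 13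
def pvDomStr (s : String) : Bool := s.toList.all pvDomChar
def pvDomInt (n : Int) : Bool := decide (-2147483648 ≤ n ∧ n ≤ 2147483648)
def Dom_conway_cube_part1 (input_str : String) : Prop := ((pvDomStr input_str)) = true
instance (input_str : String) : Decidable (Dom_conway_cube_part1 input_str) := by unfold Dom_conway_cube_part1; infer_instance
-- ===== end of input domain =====

-- B computes each generation from one Counter over all 26-neighbourhoods with a unified
-- birth/survival rule, instead of A's per-cube active/inactive classification; objective: simpler.

-- ===== PORT A =====
-- itertools.product(range(x-1,x+2), range(y-1,y+2), range(z-1,z+2)) — used verbatim by both Pythons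
def pvNbrs (cube : Int × Int × Int) : List (Int × Int × Int) :=
  (PySem.List.pyRange (cube.1 - 1) (cube.1 + 2) 1).flatMap (fun a =>
    (PySem.List.pyRange (cube.2.1 - 1) (cube.2.1 + 2) 1).flatMap (fun b =>
      (PySem.List.pyRange (cube.2.2 - 1) (cube.2.2 + 2) 1).map (fun c => (a, b, c))))

-- one generation of A: per-cube neighbour classification, survival in the loop, births from
-- the counter of collected inactive neighbours
def pvStepA (cur : PySem.Set (Int × Int × Int)) : PySem.Set (Int × Int × Int) :=
  let p := cur.foldl
    (fun (st : PySem.Set (Int × Int × Int) × List (Int × Int × Int)) cube =>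
      let allN := pvNbrs cube
      let nAct := allN.filter (fun item => PySem.Set.contains cur item && item != cube)
      let nInact := allN.filter (fun item => !(PySem.Set.contains cur item) && item != cube)
      ((if PySem.List.len nAct = 2 ∨ PySem.List.len nAct = 3
        then PySem.Set.add st.1 cube else st.1), st.2 ++ nInact))
    (PySem.Set.empty, [])
  PySem.Set.union p.1
    (PySem.Set.ofList
      (((PySem.Dict.counter p.2).items.filter (fun kv => kv.2 == 3)).map (fun kv => kv.1)))

def conway_cube_part1 (input_str : String) : Int :=
  let lines := (PySem.Str.split₀ input_str).filter (fun line => line ≠ "")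
  let init := (PySem.List.pyRange 0 (PySem.List.len lines) 1).foldl (fun s x =>
      (PySem.List.pyRange 0 (PySem.Str.len (PySem.List.pyGetD lines x "")) 1).foldl (fun s y =>
        if PySem.Str.pyGet? (PySem.List.pyGetD lines x "") y = some '#'
        then PySem.Set.add s (x, y, 0) else s) s)
    PySem.Set.empty
  PySem.Set.len ((PySem.List.pyRange 0 6 1).foldl (fun cur _ => pvStepA cur) init)

-- ===== PORT B =====
-- one generation of B: one Counter over all (26-)neighbours of active cubes, then one rule pass
def pvStepB (cur : PySem.Set (Int × Int × Int)) : PySem.Set (Int × Int × Int) :=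
  let counts := PySem.Dict.counter (cur.flatMap (fun cube => (pvNbrs cube).filter (fun n => n != cube)))
  PySem.Set.ofList
    ((counts.items.filter (fun kv => kv.2 == 3 || (kv.2 == 2 && PySem.Set.contains cur kv.1))).map
      (fun kv => kv.1))

def conway_cube_part1_alt (input_str : String) : Int :=
  let lines := (PySem.Str.split₀ input_str).filter (fun line => line ≠ "")
  let init := (PySem.List.enumerate lines).foldl (fun s xl =>
      (PySem.List.enumerate xl.2.toList).foldl (fun s ych =>
        if ych.2 = '#' then PySem.Set.add s (xl.1, ych.1, 0) else s) s)
    PySem.Set.empty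
  PySem.Set.len ((PySem.List.pyRange 0 6 1).foldl (fun cur _ => pvStepB cur) init)

-- ===== PRECONDITION & SPEC =====
def Spec_conway_cube_part1 (input_str : String) (out : Int) : Prop := out = conway_cube_part1_alt input_str
instance (input_str : String) (out : Int) : Decidable (Spec_conway_cube_part1 input_str out) := by unfold Spec_conway_cube_part1; infer_instance

-- ===== CLAIM (what is proved, stated in full; the proofs are below) =====
def Claim_equal_conway_cube_part1 : Prop := ∀ (input_str : String), Dom_conway_cube_part1 input_str → Spec_conway_cube_part1 input_str (conway_cube_part1 input_str)

-- ===== LEMMAS AND PROOFS =====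

-- geometry of the product-of-ranges neighbourhood
theorem pv_mem_pvNbrs (c d : Int × Int × Int) : c ∈ pvNbrs d ↔
    (d.1 - 1 ≤ c.1 ∧ c.1 < d.1 + 2) ∧ (d.2.1 - 1 ≤ c.2.1 ∧ c.2.1 < d.2.1 + 2) ∧
    (d.2.2 - 1 ≤ c.2.2 ∧ c.2.2 < d.2.2 + 2) := by
  obtain ⟨c1, c2, c3⟩ := c
  simp [pvNbrs, List.mem_flatMap, List.mem_map, PySem.List.mem_pyRange_one, Prod.ext_iff]

theorem pv_pvNbrs_symm (c d : Int × Int × Int) : c ∈ pvNbrs d ↔ d ∈ pvNbrs c := by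
  simp [pv_mem_pvNbrs]; omega

theorem pv_pvNbrs_eq_product (d : Int × Int × Int) : pvNbrs d =
    (PySem.List.pyRange (d.1 - 1) (d.1 + 2) 1) ×ˢ
    ((PySem.List.pyRange (d.2.1 - 1) (d.2.1 + 2) 1) ×ˢ (PySem.List.pyRange (d.2.2 - 1) (d.2.2 + 2) 1)) := by
  simp [pvNbrs, SProd.sprod, List.product, List.map_flatMap, List.map_map, Function.comp_def]

theorem pv_nodup_pvNbrs (d : Int × Int × Int) : (pvNbrs d).Nodup := by
  rw [pv_pvNbrs_eq_product]
  exact (PySem.List.nodup_pyRange_one _ _).product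
    ((PySem.List.nodup_pyRange_one _ _).product (PySem.List.nodup_pyRange_one _ _))

-- the active-neighbour count both programs are really computing
def pvN (cur : List (Int × Int × Int)) (c : Int × Int × Int) : Nat :=
  cur.countP (fun d => decide (c ∈ pvNbrs d ∧ c ≠ d))

theorem pvN_perm {curA curB : List (Int × Int × Int)} (h : curA.Perm curB) (c : Int × Int × Int) :
    pvN curA c = pvN curB c := h.countP_eq _

-- generic loop shapes ------------------------------------------------------

theorem pv_foldl_pair {α γ : Type} [BEq α] (l : List γ) (p : γ → Prop) [DecidablePred p]
    (f : γ → α) (g : γ → List α) (b : PySem.Set α) (acc : List α) :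
    l.foldl (fun st x => (if p x then PySem.Set.add st.1 (f x) else st.1, st.2 ++ g x)) (b, acc)
      = (l.foldl (fun s x => if p x then PySem.Set.add s (f x) else s) b, acc ++ l.flatMap g) := by
  induction l generalizing b acc with
  | nil => simp
  | cons x t ih => simp [ih]

theorem pv_foldl_pair_fst {α γ : Type} [BEq α] (l : List γ) (p : γ → Prop) [DecidablePred p]
    (f : γ → α) (g : γ → List α) (b : PySem.Set α) (acc : List α) :
    (l.foldl (fun st x => (if p x then PySem.Set.add st.1 (f x) else st.1, st.2 ++ g x)) (b, acc)).1
      = l.foldl (fun s x => if p x then PySem.Set.add s (f x) else s) b := by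
  rw [pv_foldl_pair]

theorem pv_foldl_pair_snd {α γ : Type} [BEq α] (l : List γ) (p : γ → Prop) [DecidablePred p]
    (f : γ → α) (g : γ → List α) (b : PySem.Set α) (acc : List α) :
    (l.foldl (fun st x => (if p x then PySem.Set.add st.1 (f x) else st.1, st.2 ++ g x)) (b, acc)).2
      = acc ++ l.flatMap g := by
  rw [pv_foldl_pair]

theorem pv_mem_foldl_addIf {α γ : Type} [BEq α] [LawfulBEq α] (l : List γ) (p : γ → Prop)
    [DecidablePred p] (f : γ → α) (s : List α) (y : α) :
    (y ∈ l.foldl (fun s x => if p x then PySem.Set.add s (f x) else s) s) ↔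
      y ∈ s ∨ ∃ x ∈ l, p x ∧ y = f x := by
  induction l generalizing s with
  | nil => simp
  | cons x t ih =>
    by_cases h : p x
    · simp only [List.foldl_cons, if_pos h, ih, PySem.Set.mem_add]
      constructor
      · rintro ((hs | rfl) | hx)
        · exact Or.inl hs
        · exact Or.inr ⟨x, by simp, h, rfl⟩
        · exact Or.inr (by obtain ⟨z, hz, hp, rfl⟩ := hx; exact ⟨z, by simp [hz], hp, rfl⟩)
      · rintro (hs | ⟨z, hz, hp, rfl⟩)
        · exact Or.inl (Or.inl hs)
        · rcases List.mem_cons.1 hz with rfl | hz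
          · exact Or.inl (Or.inr rfl)
          · exact Or.inr ⟨z, hz, hp, rfl⟩
    · simp only [List.foldl_cons, if_neg h, ih]
      constructor
      · rintro (hs | ⟨z, hz, hp, rfl⟩)
        · exact Or.inl hs
        · exact Or.inr ⟨z, by simp [hz], hp, rfl⟩
      · rintro (hs | ⟨z, hz, hp, rfl⟩)
        · exact Or.inl hs
        · rcases List.mem_cons.1 hz with rfl | hz
          · exact absurd hp h
          · exact Or.inr ⟨z, hz, hp, rfl⟩

theorem pv_nodup_foldl_addIf {α γ : Type} [BEq α] [LawfulBEq α] (l : List γ) (p : γ → Prop)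
    [DecidablePred p] (f : γ → α) (s : List α) (hs : s.Nodup) :
    (l.foldl (fun s x => if p x then PySem.Set.add s (f x) else s) s).Nodup := by
  induction l generalizing s with
  | nil => exact hs
  | cons x t ih =>
    simp only [List.foldl_cons]
    split
    · exact ih _ (PySem.Set.nodup_add _ _ hs)
    · exact ih _ hs

theorem pv_nodup_foldl_of {γ α : Type} (l : List γ) (F : List α → γ → List α)
    (hF : ∀ s x, s.Nodup → (F s x).Nodup) (s : List α) (hs : s.Nodup) :
    (l.foldl F s).Nodup := by
  induction l generalizing s with
  | nil => exact hs
  | cons x t ih => exact ih _ (hF _ _ hs)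

-- counting ------------------------------------------------------------------

theorem pv_countP_or {α : Type} (l : List α) (p q : α → Bool)
    (h : ∀ x ∈ l, ¬(p x = true ∧ q x = true)) :
    l.countP (fun x => p x || q x) = l.countP p + l.countP q := by
  induction l with
  | nil => simp
  | cons a t ih =>
    have ht := ih (fun x hx => h x (List.mem_cons_of_mem _ hx))
    simp only [List.countP_cons, ht]
    cases hpa : p a <;> cases hqa : q a
    · simp
    · simp; omega
    · simp; omega
    · exact absurd ⟨hpa, hqa⟩ (h a (List.mem_cons_self))

theorem pv_count_nodup {α : Type} [BEq α] [LawfulBEq α] (l : List α) (h : l.Nodup) (a : α) :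
    l.count a = if a ∈ l then 1 else 0 := by
  by_cases hm : a ∈ l
  · rw [if_pos hm]
    exact Nat.le_antisymm (List.nodup_iff_count_le_one.1 h a) (List.count_pos_iff.2 hm)
  · rw [if_neg hm]
    exact List.count_eq_zero.2 hm

-- |{x ∈ l₁ | x ∈ l₂}| is symmetric for nodup lists
theorem pv_countP_mem_comm {α : Type} [BEq α] [LawfulBEq α] (l₁ l₂ : List α)
    (h₁ : l₁.Nodup) (h₂ : l₂.Nodup) :
    l₁.countP (fun x => decide (x ∈ l₂)) = l₂.countP (fun x => decide (x ∈ l₁)) := by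
  induction l₁ with
  | nil => simp
  | cons a t ih =>
    obtain ⟨hat, ht⟩ := List.nodup_cons.1 h₁
    have hsplit : l₂.countP (fun x => decide (x ∈ a :: t)) =
        l₂.countP (fun x => x == a) + l₂.countP (fun x => decide (x ∈ t)) := by
      rw [← pv_countP_or l₂ _ _ ?_]
      · apply List.countP_congr
        intro x hx
        rw [Bool.or_eq_true]
        simp [List.mem_cons]
      · intro x hx
        rintro ⟨h1, h2⟩
        rw [beq_iff_eq] at h1
        simp only [decide_eq_true_eq] at h2
        exact hat (h1 ▸ h2)
    have hca : l₂.countP (fun x => x == a) = if a ∈ l₂ then 1 else 0 := by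
      rw [show l₂.countP (fun x => x == a) = l₂.count a from rfl]
      exact pv_count_nodup l₂ h₂ a
    rw [List.countP_cons, ih ht, hsplit, hca]
    by_cases hal : a ∈ l₂ <;> (simp [hal]; try omega)

-- count of c in a flatMap of filtered neighbourhoods
theorem pv_count_flatMap_filter (cur : List (Int × Int × Int))
    (p : (Int × Int × Int) → (Int × Int × Int) → Bool) (c : Int × Int × Int) :
    (cur.flatMap (fun cube => (pvNbrs cube).filter (p cube))).count c =
      cur.countP (fun cube => decide (c ∈ pvNbrs cube) && p cube c) := by
  induction cur with
  | nil => simp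
  | cons d t ih =>
    rw [List.flatMap_cons, List.count_append, ih, List.countP_cons]
    have hper : ((pvNbrs d).filter (p d)).count c =
        if decide (c ∈ pvNbrs d) && p d c then 1 else 0 := by
      by_cases hp : p d c = true
      · rw [List.count_filter hp, pv_count_nodup _ (pv_nodup_pvNbrs d)]
        by_cases hm : c ∈ pvNbrs d <;> simp [hm, hp]
      · have hnm : c ∉ (pvNbrs d).filter (p d) := by
          intro hmem
          exact hp (List.of_mem_filter hmem)
        rw [List.count_eq_zero.2 hnm]
        simp [hp]
    rw [hper]
    omega

-- selecting keys of a Counter by a predicate on (key, count)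
theorem pv_mem_counter_sel {κ : Type} [BEq κ] [LawfulBEq κ] (L : List κ) (q : κ → Int → Bool) (c : κ) :
    (c ∈ ((PySem.Dict.counter L).items.filter (fun kv => q kv.1 kv.2)).map (fun kv => kv.1)) ↔
      (c ∈ L ∧ q c (L.count c) = true) := by
  rw [PySem.Dict.items_counter]
  simp only [List.mem_map, List.mem_filter, PySem.Set.mem_ofList]
  constructor
  · rintro ⟨kv, ⟨⟨k, hk, rfl⟩, hq⟩, rfl⟩
    exact ⟨hk, hq⟩
  · rintro ⟨hc, hq⟩
    exact ⟨(c, (L.count c : Int)), ⟨⟨c, hc, rfl⟩, hq⟩, rfl⟩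

-- A's per-cube "number of active neighbours" is pvN --------------------------
theorem pv_lenAct_eq (cur : List (Int × Int × Int)) (hcur : cur.Nodup) (cube : Int × Int × Int) :
    ((pvNbrs cube).filter (fun item => PySem.Set.contains cur item && item != cube)).length =
      pvN cur cube := by
  calc ((pvNbrs cube).filter (fun item => PySem.Set.contains cur item && item != cube)).length
      = ((pvNbrs cube).filter (fun item => item != cube)).countP (fun x => decide (x ∈ cur)) := by
        rw [List.countP_filter, ← List.countP_eq_length_filter]
        apply List.countP_congr
        intro x hx
        simp
    _ = cur.countP (fun x => decide (x ∈ (pvNbrs cube).filter (fun item => item != cube))) :=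
        pv_countP_mem_comm _ _ ((pv_nodup_pvNbrs cube).filter _) hcur
    _ = pvN cur cube := by
        unfold pvN
        apply List.countP_congr
        intro d hd
        simp only [List.mem_filter, bne_iff_ne, ne_eq, decide_eq_true_eq]
        constructor
        · rintro ⟨h1, h2⟩
          exact ⟨(pv_pvNbrs_symm _ _).1 h1, fun e => h2 e.symm⟩
        · rintro ⟨h1, h2⟩
          exact ⟨(pv_pvNbrs_symm _ _).2 h1, fun e => h2 e.symm⟩

-- step characterizations -----------------------------------------------------

theorem pv_mem_stepA (cur : List (Int × Int × Int)) (hcur : cur.Nodup) (c : Int × Int × Int) :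
    c ∈ pvStepA cur ↔
      (c ∈ cur ∧ (pvN cur c = 2 ∨ pvN cur c = 3)) ∨ (c ∉ cur ∧ pvN cur c = 3) := by
  simp only [pvStepA]
  rw [pv_foldl_pair_fst, pv_foldl_pair_snd, PySem.Set.mem_union, List.nil_append]
  rw [pv_mem_foldl_addIf cur
      (fun cube => PySem.List.len ((pvNbrs cube).filter (fun item => PySem.Set.contains cur item && item != cube)) = 2 ∨
        PySem.List.len ((pvNbrs cube).filter (fun item => PySem.Set.contains cur item && item != cube)) = 3)
      (fun cube => cube)]
  rw [PySem.Set.mem_ofList, pv_mem_counter_sel _ (fun _ v => v == 3) c]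
  have hpart1 : (c ∈ PySem.Set.empty ∨ ∃ x ∈ cur,
      (PySem.List.len ((pvNbrs x).filter (fun item => PySem.Set.contains cur item && item != x)) = 2 ∨
       PySem.List.len ((pvNbrs x).filter (fun item => PySem.Set.contains cur item && item != x)) = 3) ∧ c = x) ↔
      (c ∈ cur ∧ (pvN cur c = 2 ∨ pvN cur c = 3)) := by
    rw [show (c ∈ PySem.Set.empty) = False by simp [PySem.Set.empty], false_or]
    constructor
    · rintro ⟨x, hx, hp, rfl⟩
      refine ⟨hx, ?_⟩
      rw [PySem.List.len_eq, pv_lenAct_eq cur hcur] at hp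
      exact_mod_cast hp
    · rintro ⟨hx, hp⟩
      refine ⟨c, hx, ?_, rfl⟩
      rw [PySem.List.len_eq, pv_lenAct_eq cur hcur]
      exact_mod_cast hp
  rw [hpart1]
  set L := cur.flatMap (fun cube =>
    (pvNbrs cube).filter (fun item => !(PySem.Set.contains cur item) && item != cube)) with hLdef
  have hpart2 : (c ∈ L ∧ ((L.count c : Int) == 3) = true) ↔ (c ∉ cur ∧ pvN cur c = 3) := by
    by_cases hc : c ∈ cur
    · have h0 : L.count c = 0 := by
        rw [hLdef, pv_count_flatMap_filter]
        apply List.countP_eq_zero.2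
        intro d hd
        simp [hc]
      have hnm : c ∉ L := List.count_eq_zero.1 h0
      simp [hnm, hc]
    · have h1 : L.count c = pvN cur c := by
        rw [hLdef, pv_count_flatMap_filter]
        unfold pvN
        apply List.countP_congr
        intro d hd
        simp [hc]
      have hmemL : c ∈ L ↔ 0 < pvN cur c := by
        rw [← h1, List.count_pos_iff]
      rw [h1, hmemL]
      simp only [beq_iff_eq, hc, not_false_iff, true_and]
      constructor
      · rintro ⟨hpos, h3⟩
        exact_mod_cast h3
      · intro h3
        exact ⟨by omega, by exact_mod_cast h3⟩
  rw [hpart2]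

theorem pv_mem_stepB (cur : List (Int × Int × Int)) (c : Int × Int × Int) :
    c ∈ pvStepB cur ↔ pvN cur c = 3 ∨ (pvN cur c = 2 ∧ c ∈ cur) := by
  simp only [pvStepB]
  rw [PySem.Set.mem_ofList,
    pv_mem_counter_sel _ (fun k v => v == 3 || (v == 2 && PySem.Set.contains cur k)) c]
  have hcnt : (cur.flatMap (fun cube => (pvNbrs cube).filter (fun n => n != cube))).count c = pvN cur c := by
    rw [pv_count_flatMap_filter]
    unfold pvN
    apply List.countP_congr
    intro d hd
    simp
  have hmemL : c ∈ cur.flatMap (fun cube => (pvNbrs cube).filter (fun n => n != cube)) ↔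
      0 < pvN cur c := by
    rw [← hcnt, List.count_pos_iff]
  rw [hmemL, hcnt]
  simp only [Bool.or_eq_true, Bool.and_eq_true, beq_iff_eq]
  constructor
  · rintro ⟨hpos, h3 | ⟨h2, hcc⟩⟩
    · exact Or.inl (by exact_mod_cast h3)
    · exact Or.inr ⟨by exact_mod_cast h2, (PySem.Set.contains_iff cur c).1 hcc⟩
  · rintro (h3 | ⟨h2, hcc⟩)
    · exact ⟨by omega, Or.inl (by exact_mod_cast h3)⟩
    · exact ⟨by omega, Or.inr ⟨by exact_mod_cast h2, (PySem.Set.contains_iff cur c).2 hcc⟩⟩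

theorem pv_nodup_stepA (cur : List (Int × Int × Int)) : (pvStepA cur).Nodup := by
  simp only [pvStepA]
  rw [pv_foldl_pair_fst]
  exact PySem.Set.nodup_union _ _ (pv_nodup_foldl_addIf _ _ _ _ List.nodup_nil)

theorem pv_nodup_stepB (cur : List (Int × Int × Int)) : (pvStepB cur).Nodup := by
  simp only [pvStepB]
  exact PySem.Set.nodup_ofList _

-- one step preserves "same set"
theorem pv_step_perm {curA curB : List (Int × Int × Int)} (hA : curA.Nodup) (h : curA.Perm curB) :
    (pvStepA curA).Perm (pvStepB curB) := by
  rw [List.perm_ext_iff_of_nodup (pv_nodup_stepA curA) (pv_nodup_stepB curB)]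
  intro c
  rw [pv_mem_stepA curA hA c, pv_mem_stepB curB c, ← pvN_perm h c, ← h.mem_iff]
  by_cases hm : c ∈ curA <;> by_cases h2 : pvN curA c = 2 <;> by_cases h3 : pvN curA c = 3 <;>
    simp [hm, h2, h3]

-- the six iterations
theorem pv_iter_perm (l : List Int) {curA curB : List (Int × Int × Int)}
    (hA : curA.Nodup) (h : curA.Perm curB) :
    (l.foldl (fun cur _ => pvStepA cur) curA).Perm (l.foldl (fun cur _ => pvStepB cur) curB) := by
  induction l generalizing curA curB with
  | nil => exact h
  | cons x t ih => exact ih (pv_nodup_stepA curA) (pv_step_perm hA h)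

-- the two parsings build the same initial set -------------------------------

theorem pv_init_eq (lines : List String) :
    ((PySem.List.pyRange 0 (PySem.List.len lines) 1).foldl (fun s x =>
      (PySem.List.pyRange 0 (PySem.Str.len (PySem.List.pyGetD lines x "")) 1).foldl (fun s y =>
        if PySem.Str.pyGet? (PySem.List.pyGetD lines x "") y = some '#'
        then PySem.Set.add s (x, y, 0) else s) s)
      (PySem.Set.empty : PySem.Set (Int × Int × Int)))
    = (PySem.List.enumerate lines).foldl (fun s xl =>
      (PySem.List.enumerate xl.2.toList).foldl (fun s ych =>
        if ych.2 = '#' then PySem.Set.add s (xl.1, ych.1, 0) else s) s)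
      PySem.Set.empty := by
  rw [PySem.List.enumerate_eq_map_pyRange lines "", List.foldl_map]
  apply PySem.List.foldl_congr_mem
  intro s x hx
  rw [PySem.List.enumerate_eq_map_pyRange (PySem.List.pyGetD lines x "").toList ' ',
    List.foldl_map]
  have hlen : PySem.Str.len (PySem.List.pyGetD lines x "") =
      PySem.List.len (PySem.List.pyGetD lines x "").toList := by
    rw [PySem.Str.len_eq, PySem.List.len_eq]
  rw [hlen]
  apply PySem.List.foldl_congr_mem
  intro s y hy
  obtain ⟨hy0, hyl⟩ := PySem.List.mem_pyRange_one.1 hy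
  rw [PySem.List.len_eq] at hyl
  have hnat : y.toNat < (PySem.List.pyGetD lines x "").toList.length := by omega
  have h1 : PySem.Str.pyGet? (PySem.List.pyGetD lines x "") y =
      some ((PySem.List.pyGetD lines x "").toList[y.toNat]) := by
    simp only [PySem.Str.pyGet?, PySem.Chars.pyGet?]
    rw [PySem.List.pyGet?_of_nonneg _ hy0, List.getElem?_eq_getElem hnat]
  have h2 : PySem.List.pyGetD (PySem.List.pyGetD lines x "").toList y ' ' =
      (PySem.List.pyGetD lines x "").toList[y.toNat] := by
    rw [PySem.List.pyGetD_eq_getElem _ ' ' hy0 (by omega)]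
  simp only [h1, h2, Option.some.injEq]

theorem pv_nodup_init (lines : List String) :
    ((PySem.List.pyRange 0 (PySem.List.len lines) 1).foldl (fun s x =>
      (PySem.List.pyRange 0 (PySem.Str.len (PySem.List.pyGetD lines x "")) 1).foldl (fun s y =>
        if PySem.Str.pyGet? (PySem.List.pyGetD lines x "") y = some '#'
        then PySem.Set.add s (x, y, 0) else s) s)
      (PySem.Set.empty : PySem.Set (Int × Int × Int))).Nodup := by
  apply pv_nodup_foldl_of _ _ ?_ _ List.nodup_nil
  intro s x hs
  exact pv_nodup_foldl_addIf _ _ (fun y => ((x : Int), (y : Int), (0 : Int))) _ hs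

-- ===== VERDICT (by name: the statement is the Claim_ definition above) =====
theorem conway_cube_part1_spec : Claim_equal_conway_cube_part1 := by
  unfold Claim_equal_conway_cube_part1
  intro input_str _
  unfold Spec_conway_cube_part1
  show conway_cube_part1 input_str = conway_cube_part1_alt input_str
  simp only [conway_cube_part1, conway_cube_part1_alt]
  rw [← pv_init_eq]
  have hperm := pv_iter_perm (PySem.List.pyRange 0 6 1)
    (pv_nodup_init ((PySem.Str.split₀ input_str).filter (fun line => line ≠ "")))
    (List.Perm.refl _)
  simp only [PySem.Set.len]
  exact congrArg _ hperm.length_eq
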